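-- pv_equiv track=rewrite | github.com/s-surineni/atice | greater_than_this.py | find_greater_than_this
-- ===== SOURCE A (Python) =====
-- def find_greater_than_this(num_list):
--     greater_count = [0] * len(num_list)
--
--     for idx in range(len(num_list) - 2, -1, -1):
--         if num_list[idx] > num_list[idx + 1]:
--             greater_count[idx] = greater_count[idx + 1] + 1
--         else:
--             for idx2 in range(idx +1 , len(num_list)):
--                 if num_list[idx] > num_list[idx2]:
--                     greater_count[idx] = greater_count[idx2] + 1
--                     break
--
--     return greater_count
-- ===== SOURCE B (Python) =====
-- def find_greater_than_this(num_list):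
--     # One right-to-left pass with a monotonic stack of (value, count) pairs:
--     # the count for each element is 1 + count of the nearest strictly
--     # smaller element to its right (0 if none).
--     stack = []
--     out = []
--     for x in reversed(num_list):
--         while stack and stack[-1][0] >= x:
--             stack.pop()
--         c = stack[-1][1] + 1 if stack else 0
--         stack.append((x, c))
--         out.append(c)
--     out.reverse()
--     return out
-- ===== Notes on version B (the rewrite author's own statement) =====
-- stated objective: faster
-- what changed: Replaced the per-element rightward rescan for the next strictly smaller element by a single right-to-left pass with a monotonic stack of (value, count) pairs.
import Mathlib
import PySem

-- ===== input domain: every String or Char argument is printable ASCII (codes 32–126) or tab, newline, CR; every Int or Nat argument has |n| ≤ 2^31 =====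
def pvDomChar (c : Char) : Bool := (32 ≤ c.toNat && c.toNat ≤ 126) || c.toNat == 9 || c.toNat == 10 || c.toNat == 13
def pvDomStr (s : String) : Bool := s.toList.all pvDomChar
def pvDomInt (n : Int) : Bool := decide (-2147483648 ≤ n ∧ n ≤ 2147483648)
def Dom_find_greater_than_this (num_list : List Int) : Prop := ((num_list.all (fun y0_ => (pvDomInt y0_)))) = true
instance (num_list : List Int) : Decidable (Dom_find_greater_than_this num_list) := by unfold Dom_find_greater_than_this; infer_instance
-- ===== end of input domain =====

-- B replaces A's quadratic rightward rescans by one right-to-left monotonic-stack pass (objective: faster).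

-- ===== PORT A =====
-- inner 'for idx2 in range(idx+1, len(num_list)): if …: …; break'
def pvInnerA (num_list : List Int) (idx : Int) (gc : List Int) : List Int → List Int
  | [] => gc
  | idx2 :: rest =>
    if PySem.List.pyGetD num_list idx 0 > PySem.List.pyGetD num_list idx2 0 then
      gc.set idx.toNat (PySem.List.pyGetD gc idx2 0 + 1)
    else pvInnerA num_list idx gc rest

def find_greater_than_this (num_list : List Int) : List Int :=
  (PySem.List.pyRange ((num_list.length : Int) - 2) (-1) (-1)).foldl
    (fun gc idx =>
      if PySem.List.pyGetD num_list idx 0 > PySem.List.pyGetD num_list (idx + 1) 0 then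
        gc.set idx.toNat (PySem.List.pyGetD gc (idx + 1) 0 + 1)
      else
        pvInnerA num_list idx gc (PySem.List.pyRange (idx + 1) (num_list.length : Int) 1))
    (List.replicate num_list.length 0)

-- ===== PORT B =====
-- 'while stack and stack[-1][0] >= x: stack.pop()'
def pvPop (x : Int) : List (Int × Int) → List (Int × Int)
  | [] => []
  | (v, k) :: rest => if v ≥ x then pvPop x rest else (v, k) :: rest

def find_greater_than_this_alt (num_list : List Int) : List Int :=
  let r := num_list.reverse.foldl
    (fun (st_out : List (Int × Int) × List Int) x =>
      let st := pvPop x st_out.1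
      let c : Int := match st with | [] => 0 | (_, k) :: _ => k + 1
      ((x, c) :: st, st_out.2 ++ [c]))
    ([], [])
  r.2.reverse

-- ===== PRECONDITION & SPEC =====
def Spec_find_greater_than_this (num_list : List Int) (out : List Int) : Prop := out = find_greater_than_this_alt num_list
instance (num_list : List Int) (out : List Int) : Decidable (Spec_find_greater_than_this num_list out) := by unfold Spec_find_greater_than_this; infer_instance

-- ===== CLAIM (what is proved, stated in full; the proofs are below) =====
def Claim_equal_find_greater_than_this : Prop := ∀ (num_list : List Int), Dom_find_greater_than_this num_list → Spec_find_greater_than_this num_list (find_greater_than_this num_list)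

-- ===== LEMMAS AND PROOFS =====

-- count for value x given the list to its right: 1 + count of the first strictly smaller element
def pvG (x : Int) : List Int → Int
  | [] => 0
  | y :: t => if y < x then pvG y t + 1 else pvG x t

-- the common specification of both programs
def pvSpecList : List Int → List Int
  | [] => []
  | x :: t => pvG x t :: pvSpecList t

-- structural right-to-left recursion computing B's (stack, reversed output)
def pvBAux : List Int → List (Int × Int) × List Int
  | [] => ([], [])
  | x :: t =>
    let p := pvBAux t
    let st := pvPop x p.1
    let c : Int := match st with | [] => 0 | (_, k) :: _ => k + 1
    ((x, c) :: st, c :: p.2)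

theorem pvPop_pvPop (x y : Int) (h : x ≤ y) (st : List (Int × Int)) :
    pvPop x (pvPop y st) = pvPop x st := by
  induction st with
  | nil => rfl
  | cons p rest ih =>
    obtain ⟨v, k⟩ := p
    by_cases hv : v ≥ y
    · simp [pvPop, hv, ih, show v ≥ x by omega]
    · simp [pvPop, hv]

theorem pvBAux_stack_eval (t : List Int) (x : Int) :
    (match pvPop x (pvBAux t).1 with | [] => (0 : Int) | (_, k) :: _ => k + 1) = pvG x t := by
  induction t generalizing x with
  | nil => rfl
  | cons y s ih =>
    show (match pvPop x ((y, _) :: pvPop y (pvBAux s).1) with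
          | [] => (0:Int) | (_, k) :: _ => k + 1) = pvG x (y :: s)
    by_cases hy : y ≥ x
    · rw [show pvPop x ((y, match pvPop y (pvBAux s).1 with | [] => (0:Int) | (_, k) :: _ => k + 1)
            :: pvPop y (pvBAux s).1) = pvPop x (pvPop y (pvBAux s).1) by simp [pvPop, hy]]
      rw [pvPop_pvPop x y hy, ih x]
      simp [pvG, show ¬ y < x by omega]
    · rw [show pvPop x ((y, match pvPop y (pvBAux s).1 with | [] => (0:Int) | (_, k) :: _ => k + 1)
            :: pvPop y (pvBAux s).1) = (y, match pvPop y (pvBAux s).1 with | [] => (0:Int) | (_, k) :: _ => k + 1)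
            :: pvPop y (pvBAux s).1 by simp [pvPop, hy]]
      simp only [ih y]
      simp [pvG, show y < x by omega]

theorem pvBAux_out (t : List Int) : (pvBAux t).2 = pvSpecList t := by
  induction t with
  | nil => rfl
  | cons x s ih =>
    show (match pvPop x (pvBAux s).1 with | [] => (0:Int) | (_, k) :: _ => k + 1) :: (pvBAux s).2
        = pvG x s :: pvSpecList s
    rw [pvBAux_stack_eval, ih]

theorem pvAlt_fold (l : List Int) :
    l.reverse.foldl
      (fun (st_out : List (Int × Int) × List Int) x =>
        let st := pvPop x st_out.1
        let c : Int := match st with | [] => 0 | (_, k) :: _ => k + 1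
        ((x, c) :: st, st_out.2 ++ [c]))
      ([], [])
    = ((pvBAux l).1, (pvBAux l).2.reverse) := by
  induction l with
  | nil => rfl
  | cons x t ih =>
    rw [List.reverse_cons, List.foldl_append, ih]
    simp [pvBAux]

theorem alt_eq_spec (l : List Int) : find_greater_than_this_alt l = pvSpecList l := by
  unfold find_greater_than_this_alt
  rw [pvAlt_fold]
  simp [pvBAux_out]

-- facts about the spec list
theorem pvSpecList_length (l : List Int) : (pvSpecList l).length = l.length := by
  induction l with
  | nil => rfl
  | cons x t ih => simp [pvSpecList, ih]

theorem pvSpecList_getD (l : List Int) (i : Nat) (h : i < l.length) :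
    (pvSpecList l).getD i 0 = pvG (l.getD i 0) (l.drop (i + 1)) := by
  induction l generalizing i with
  | nil => simp at h
  | cons x t ih =>
    cases i with
    | zero => simp [pvSpecList]
    | succ j =>
      simp only [pvSpecList, List.getD_cons_succ, List.drop_succ_cons]
      exact ih j (by simpa using h)

-- pvG on a cons from drop
theorem pvG_drop (l : List Int) (x : Int) (j : Nat) (h : j < l.length) :
    pvG x (l.drop j) = if l.getD j 0 < x then pvG (l.getD j 0) (l.drop (j + 1)) + 1
                       else pvG x (l.drop (j + 1)) := by
  rw [List.drop_eq_getElem_cons h]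
  simp [pvG, List.getElem?_eq_getElem h]

-- the invariant of A's outer loop
def pvInv (a : List Int) (k : Nat) (gc : List Int) : Prop :=
  gc.length = a.length
  ∧ (∀ i : Nat, k ≤ i → i < a.length → gc.getD i 0 = pvG (a.getD i 0) (a.drop (i + 1)))
  ∧ (∀ i : Nat, i < k → gc.getD i 0 = 0)

theorem set_getD_self (gc : List Int) (m : Nat) (h : m < gc.length) (hv : gc.getD m 0 = v) :
    gc.set m v = gc := by
  subst hv
  rw [List.getD_eq_getElem gc 0 h]
  exact List.set_getElem_self ..

-- getD facts used by the invariant bookkeeping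
theorem getD_set_self (gc : List Int) (m : Nat) (v : Int) (h : m < gc.length) :
    (gc.set m v).getD m 0 = v := by
  simp [List.getD_eq_getElem?_getD, h]

theorem getD_set_ne (gc : List Int) (m i : Nat) (v : Int) (h : i ≠ m) :
    (gc.set m v).getD i 0 = gc.getD i 0 := by
  simp [List.getD_eq_getElem?_getD, List.getElem?_set_ne (by omega : m ≠ i)]

theorem getD_replicate_zero (n i : Nat) : (List.replicate n (0:Int)).getD i 0 = 0 := by
  simp [List.getD_eq_getElem?_getD, List.getElem?_replicate]
  split <;> rfl

-- inner loop computes exactly 'set m' to pvG of the remaining suffix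
theorem pvInnerA_spec (a : List Int) (m : Nat) (hm : m < a.length) :
    ∀ d j gc, a.length - j = d → m < j → j ≤ a.length → gc.length = a.length →
    (∀ i : Nat, j ≤ i → i < a.length → gc.getD i 0 = pvG (a.getD i 0) (a.drop (i + 1))) →
    gc.getD m 0 = 0 →
    pvInnerA a (m : Int) gc (PySem.List.pyRange (j : Int) (a.length : Int) 1)
      = gc.set m (pvG (a.getD m 0) (a.drop j)) := by
  intro d
  induction d with
  | zero =>
    intro j gc hd hmj hjn hlen hset hz
    have hj : j = a.length := by omega
    subst hj
    rw [PySem.List.pyRange_one_eq_nil (le_refl _), List.drop_length]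
    show gc = gc.set m (pvG (a.getD m 0) [])
    rw [show pvG (a.getD m 0) [] = 0 from rfl]
    exact (set_getD_self gc m (by omega) hz).symm
  | succ d ih =>
    intro j gc hd hmj hjn hlen hset hz
    have hjn' : j < a.length := by omega
    rw [PySem.List.pyRange_one_cons (by exact_mod_cast hjn')]
    rw [show ((j : Int) + 1) = ((j + 1 : Nat) : Int) by push_cast; ring]
    simp only [pvInnerA, PySem.List.pyGetD_natCast, Int.toNat_natCast]
    rw [pvG_drop a (a.getD m 0) j hjn']
    by_cases h : a.getD m 0 > a.getD j 0
    · rw [if_pos h, if_pos (by omega : a.getD j 0 < a.getD m 0)]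
      rw [hset j (le_refl _) hjn']
    · rw [if_neg h, if_neg (by omega : ¬ a.getD j 0 < a.getD m 0)]
      exact ih (j + 1) gc (by omega) (by omega) (by omega) hlen
        (fun i h1 h2 => hset i (by omega) h2) hz

-- setting entry m to its specified value pushes the invariant one step left
theorem pvInv_set (a gc : List Int) (m : Nat) (_hm : m < a.length) (hinv : pvInv a (m + 1) gc) :
    pvInv a m (gc.set m (pvG (a.getD m 0) (a.drop (m + 1)))) := by
  obtain ⟨hlen, hset, hz⟩ := hinv
  refine ⟨by simpa using hlen, ?_, ?_⟩
  · intro i h1 h2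
    by_cases hi : i = m
    · rw [hi, getD_set_self gc m _ (by omega)]
    · rw [getD_set_ne gc m i _ hi]
      exact hset i (by omega) h2
  · intro i h1
    rw [getD_set_ne gc m i _ (by omega)]
    exact hz i (by omega)

-- one outer step preserves the invariant
theorem pvStep_inv (a gc : List Int) (m : Nat) (hm : m + 1 < a.length) (hinv : pvInv a (m + 1) gc) :
    pvInv a m
      (if PySem.List.pyGetD a (m : Int) 0 > PySem.List.pyGetD a ((m : Int) + 1) 0 then
          gc.set (m : Int).toNat (PySem.List.pyGetD gc ((m : Int) + 1) 0 + 1)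
        else
          pvInnerA a (m : Int) gc (PySem.List.pyRange ((m : Int) + 1) (a.length : Int) 1)) := by
  obtain ⟨hlen, hset, hz⟩ := hinv
  rw [show ((m : Int) + 1) = ((m + 1 : Nat) : Int) by push_cast; ring]
  simp only [PySem.List.pyGetD_natCast, Int.toNat_natCast]
  by_cases h : a.getD m 0 > a.getD (m + 1) 0
  · rw [if_pos h]
    have hval : gc.getD (m + 1) 0 + 1 = pvG (a.getD m 0) (a.drop (m + 1)) := by
      rw [hset (m + 1) (le_refl _) hm, pvG_drop a _ (m + 1) hm,
        if_pos (by omega : a.getD (m + 1) 0 < a.getD m 0)]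
    rw [hval]
    exact pvInv_set a gc m (by omega) ⟨hlen, hset, hz⟩
  · rw [if_neg h]
    rw [pvInnerA_spec a m (by omega) (a.length - (m + 1)) (m + 1) gc rfl (by omega) (by omega)
      hlen hset (hz m (by omega))]
    exact pvInv_set a gc m (by omega) ⟨hlen, hset, hz⟩

-- the countdown fold keeps the invariant all the way down to 0
theorem pvFold_inv (a : List Int) (m : Nat) (hm : m + 1 ≤ a.length) :
    ∀ gc, pvInv a m gc →
    pvInv a 0
      ((PySem.List.pyRange ((m : Int) - 1) (-1) (-1)).foldl
        (fun gc idx =>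
          if PySem.List.pyGetD a idx 0 > PySem.List.pyGetD a (idx + 1) 0 then
            gc.set idx.toNat (PySem.List.pyGetD gc (idx + 1) 0 + 1)
          else
            pvInnerA a idx gc (PySem.List.pyRange (idx + 1) (a.length : Int) 1)) gc) := by
  induction m with
  | zero =>
    intro gc hinv
    rw [show ((0 : Nat) : Int) - 1 = -1 by ring, PySem.List.pyRange_neg_one_eq_nil (le_refl _)]
    exact hinv
  | succ k ih =>
    intro gc hinv
    rw [show ((k + 1 : Nat) : Int) - 1 = (k : Int) by push_cast; ring,
      PySem.List.pyRange_neg_one_cons (by omega : (-1 : Int) < (k : Int)), List.foldl_cons]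
    exact ih (by omega) _ (pvStep_inv a gc k (by omega) hinv)

theorem a_eq_spec (l : List Int) : find_greater_than_this l = pvSpecList l := by
  unfold find_greater_than_this
  by_cases hl : l = []
  · subst hl
    rfl
  · have hn : 1 ≤ l.length := by
      cases l with
      | nil => exact absurd rfl hl
      | cons x t => simp
    rw [show ((l.length : Int) - 2) = ((l.length - 1 : Nat) : Int) - 1 by omega]
    have hinit : pvInv l (l.length - 1) (List.replicate l.length 0) := by
      refine ⟨by simp, ?_, fun i _ => getD_replicate_zero _ _⟩
      intro i h1 h2
      have hi : i + 1 = l.length := by omega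
      rw [getD_replicate_zero, hi, List.drop_length]
      rfl
    have hfin := pvFold_inv l (l.length - 1) (by omega) (List.replicate l.length 0) hinit
    obtain ⟨hlen, hset, -⟩ := hfin
    apply List.ext_getElem (by rw [hlen, pvSpecList_length])
    intro i h1 h2
    have hi : i < l.length := by rwa [hlen] at h1
    rw [← List.getD_eq_getElem _ 0 h1, ← List.getD_eq_getElem _ 0 h2,
      hset i (Nat.zero_le _) hi, pvSpecList_getD l i hi]

-- ===== VERDICT (by name: the statement is the Claim_ definition above) =====
theorem find_greater_than_this_spec : Claim_equal_find_greater_than_this := by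
  intro l _
  unfold Spec_find_greater_than_this
  rw [a_eq_spec, alt_eq_spec]
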